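-- pv_equiv track=rewrite | github.com/morisanyutakun-png/iplus-sys | backend/app/api/word_test.py | _looks_like_word_value
-- ===== SOURCE A (Python) =====
-- import unicodedata
--
-- def _looks_like_word_value(text: str) -> bool:
--     has_latin = False
--     for ch in text:
--         if ch.isspace():
--             continue
--         name = unicodedata.name(ch, "")
--         category = unicodedata.category(ch)
--         if "LATIN" in name:
--             has_latin = True
--             continue
--         if category.startswith(("M", "N", "P", "S")):
--             continue
--         return False
--     return has_latin
-- ===== SOURCE B (Python) =====
-- import unicodedata
--
-- def _acceptable(ch: str) -> bool:
--     return "LATIN" in unicodedata.name(ch, "") or unicodedata.category(ch).startswith(("M", "N", "P", "S"))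
--
-- def _is_latin(ch: str) -> bool:
--     return "LATIN" in unicodedata.name(ch, "")
--
-- def _looks_like_word_value(text: str) -> bool:
--     chars = [ch for ch in text if not ch.isspace()]
--     return all(_acceptable(ch) for ch in chars) and any(_is_latin(ch) for ch in chars)
-- ===== Notes on version B (the rewrite author's own statement) =====
-- stated objective: simpler
-- what changed: Replaces A's single fused loop with a has_latin flag and early return by two independent boolean reductions (all acceptable / any latin) over the filtered non-whitespace characters.
import Mathlib
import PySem

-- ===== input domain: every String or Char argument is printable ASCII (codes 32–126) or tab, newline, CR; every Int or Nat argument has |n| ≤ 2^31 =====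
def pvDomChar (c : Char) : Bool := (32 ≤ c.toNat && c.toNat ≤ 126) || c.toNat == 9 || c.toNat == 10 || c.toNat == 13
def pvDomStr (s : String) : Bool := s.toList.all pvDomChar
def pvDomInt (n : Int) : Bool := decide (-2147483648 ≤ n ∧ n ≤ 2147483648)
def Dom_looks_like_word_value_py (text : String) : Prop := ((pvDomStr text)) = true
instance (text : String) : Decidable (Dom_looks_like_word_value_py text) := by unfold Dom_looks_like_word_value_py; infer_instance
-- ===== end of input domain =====

-- B replaces A's fused loop with a has_latin flag by two boolean reductions (all/any) over the filtered non-whitespace chars; objective: simpler.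


-- ===== PORT A =====
-- 'LATIN' in unicodedata.name(ch, ""): exact on printable ASCII, where exactly the
-- ASCII letters have names containing "LATIN" ("LATIN CAPITAL/SMALL LETTER …").
def pvLatinName (c : Char) : Bool := PySem.Chars.isalpha c
-- unicodedata.category(ch).startswith(("M","N","P","S")): exact on printable ASCII,
-- where exactly the printable non-letter non-space characters are category N*/P*/S* (none is M*).
def pvCatMNPS (c : Char) : Bool := 33 ≤ c.toNat && c.toNat ≤ 126 && !PySem.Chars.isalpha c

-- the for-loop of A with its has_latin accumulator and early return False
def pvLoopA : List Char → Bool → Bool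
  | [], hasLatin => hasLatin
  | c :: cs, hasLatin =>
    if PySem.Chars.isspace c then pvLoopA cs hasLatin
    else if pvLatinName c then pvLoopA cs true
    else if pvCatMNPS c then pvLoopA cs hasLatin
    else false

def looks_like_word_value_py (text : String) : Bool := pvLoopA text.toList false

-- ===== PORT B =====
def pvAcceptable (c : Char) : Bool := pvLatinName c || pvCatMNPS c

def looks_like_word_value_py_alt (text : String) : Bool :=
  let chars := text.toList.filter (fun c => !PySem.Chars.isspace c)
  chars.all pvAcceptable && chars.any pvLatinName

-- ===== PRECONDITION & SPEC =====
def Spec_looks_like_word_value_py (text : String) (out : Bool) : Prop := out = looks_like_word_value_py_alt text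
instance (text : String) (out : Bool) : Decidable (Spec_looks_like_word_value_py text out) := by unfold Spec_looks_like_word_value_py; infer_instance

-- ===== CLAIM (what is proved, stated in full; the proofs are below) =====
def Claim_equal_looks_like_word_value_py : Prop := ∀ (text : String), Dom_looks_like_word_value_py text → Spec_looks_like_word_value_py text (looks_like_word_value_py text)

-- ===== LEMMAS AND PROOFS =====

-- On a domain character, non-space implies acceptable (letter, or printable non-letter).
theorem pvAcceptable_of_dom (c : Char) (hd : pvDomChar c = true)
    (hs : PySem.Chars.isspace c = false) : pvAcceptable c = true := by
  simp [pvDomChar] at hd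
  simp [PySem.Chars.isspace] at hs
  by_cases ha : PySem.Chars.isalpha c = true
  · simp [pvAcceptable, pvLatinName, ha]
  · have ha' : PySem.Chars.isalpha c = false := by simpa using ha
    simp [pvAcceptable, pvLatinName, pvCatMNPS, ha']
    omega

-- the loop computes: everything acceptable and (flag or some latin) — on domain chars
theorem pvLoopA_eq (l : List Char) (f : Bool) (hd : l.all pvDomChar = true) :
    pvLoopA l f
      = ((l.filter (fun c => !PySem.Chars.isspace c)).all pvAcceptable
         && (f || (l.filter (fun c => !PySem.Chars.isspace c)).any pvLatinName)) := by
  induction l generalizing f with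
  | nil => simp [pvLoopA]
  | cons c cs ih =>
    simp only [List.all_cons, Bool.and_eq_true] at hd
    obtain ⟨hc, hcs⟩ := hd
    by_cases hs : PySem.Chars.isspace c = true
    · simp [pvLoopA, hs, ih _ hcs, List.filter]
    · have hs' : PySem.Chars.isspace c = false := by simpa using hs
      have hacc := pvAcceptable_of_dom c hc hs'
      by_cases hl : pvLatinName c = true
      · simp [pvLoopA, hs', hl, ih _ hcs, List.filter, hacc]
      · have hl' : pvLatinName c = false := by simpa using hl
        have hm : pvCatMNPS c = true := by
          simp [pvAcceptable, hl'] at hacc; exact hacc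
        simp [pvLoopA, hs', hl', hm, ih _ hcs, List.filter, hacc]

-- ===== VERDICT (by name: the statement is the Claim_ definition above) =====
theorem looks_like_word_value_py_spec : Claim_equal_looks_like_word_value_py := by
  intro text hdom
  unfold Spec_looks_like_word_value_py looks_like_word_value_py looks_like_word_value_py_alt
  have hd : text.toList.all pvDomChar = true := hdom
  rw [pvLoopA_eq _ _ hd]
  simp
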